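-- pv_equiv track=rewrite | github.com/blueboy1593/KAKAO_problem_solving | 2019카카오개발자겨울인턴십/불량사용자.py | solution
-- ===== SOURCE A (Python) =====
-- def solution(user_id, banned_id):
--     answer = 0
--     user_len = len(user_id)
--     banned_len = len(banned_id)
--
--     # 1번 불량 사용자인지 비교
--     def check_id(user, banned):
--         if len(user) != len(banned):
--             return False
--         for k in range(len(user)):
--             if banned[k] == '*':
--                 continue
--             if user[k] != banned[k]:
--                 return False
--         return True
--
--     # 2번 재귀를 통해 전체 리스트 만들기
--     total_users = set()
--     user_stack = []
--     def match(i):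
--         if i == banned_len:
--             total_users.add(tuple(sorted(user_stack[:])))
--             return
--         ban_id = banned_id[i]
--         for j in range(user_len):
--             if user_id[j] not in user_stack: # 현재 스택에 중복되어 있는지.
--                 if check_id(user_id[j], banned_id[i]): # 불량 사용자와 매치가 되는지
--                     user_stack.append(user_id[j])
--                     match(i + 1)
--                     user_stack.pop()
--     match(0)
--
--     answer = len(total_users)
--     return answer
-- ===== SOURCE B (Python) =====
-- def solution(user_id, banned_id):
--     # Layered set-of-sorted-tuples build over per-pattern candidate lists
--     # (vs A's DFS backtracking with a shared mutable stack and dedup only at the leaves).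
--     def matches(u, b):
--         return len(u) == len(b) and all(bc == '*' or uc == bc for uc, bc in zip(u, b))
--     combos = {()}
--     for b in banned_id:
--         if not combos:
--             break
--         cand = [u for u in user_id if matches(u, b)]
--         combos = {tuple(sorted(c + (u,))) for c in combos for u in cand if u not in c}
--     return len(combos)
-- ===== Notes on version B (the rewrite author's own statement) =====
-- stated objective: faster
-- what changed: Replaces A's DFS backtracking (shared mutable stack, dedup only at the leaves) with an iterative layer-by-layer build that keeps each layer as a set of sorted tuples and stops once a layer is empty, so the up-to-m! orderings of each combination and the dead tail of patterns are never explored.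
import Mathlib
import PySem

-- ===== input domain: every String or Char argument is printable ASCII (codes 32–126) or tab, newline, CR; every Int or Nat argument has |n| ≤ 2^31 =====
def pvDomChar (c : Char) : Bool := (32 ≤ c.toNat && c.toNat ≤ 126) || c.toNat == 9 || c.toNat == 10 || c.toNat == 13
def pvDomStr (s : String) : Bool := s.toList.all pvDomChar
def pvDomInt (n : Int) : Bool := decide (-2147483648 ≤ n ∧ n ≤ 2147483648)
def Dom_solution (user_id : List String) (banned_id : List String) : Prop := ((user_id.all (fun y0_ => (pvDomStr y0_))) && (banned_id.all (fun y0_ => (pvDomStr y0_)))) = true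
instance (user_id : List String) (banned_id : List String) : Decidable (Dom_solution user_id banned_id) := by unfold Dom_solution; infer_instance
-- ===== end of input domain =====

-- B replaces A's DFS backtracking (shared stack, dedup at leaves) by a layered build deduplicating each layer (measured faster); return values proved equal.
-- ===== PORT A =====
-- index loop 'for k in range(len(user))' ported as paired recursion over the char lists (exact: lengths are equal under the guard)
def checkLoop : List Char → List Char → Bool
  | u :: us, b :: bs => if b = '*' then checkLoop us bs else if u ≠ b then false else checkLoop us bs
  | _, _ => true

def checkId (user banned : String) : Bool :=
  if user.toList.length ≠ banned.toList.length then false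
  else checkLoop user.toList banned.toList

mutual
def matchA (uids : List String) : List String → List String → PySem.Set (List String) → PySem.Set (List String)
  | [], stack, acc => PySem.Set.add acc (PySem.List.sorted stack (fun x => x) false)
  | b :: rest, stack, acc => matchALoop uids b rest stack acc uids
termination_by bans _ _ => (bans.length, 1, 0)

def matchALoop (uids : List String) (b : String) (rest : List String) (stack : List String)
    (acc : PySem.Set (List String)) : List String → PySem.Set (List String)
  | [] => acc
  | u :: us =>
      matchALoop uids b rest stack
        (if u ∉ stack then
           (if checkId u b then matchA uids rest (stack ++ [u]) acc else acc)
         else acc) us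
termination_by l => (rest.length + 1, 0, l.length)
end

def solution (user_id : List String) (banned_id : List String) : Int :=
  ((matchA user_id banned_id [] PySem.Set.empty).length : Int)

-- ===== PORT B =====
def checkB (u b : String) : Bool :=
  u.toList.length == b.toList.length &&
    (u.toList.zip b.toList).all (fun p => p.2 == '*' || p.1 == p.2)

def solution_alt (user_id : List String) (banned_id : List String) : Int :=
  -- 'if not combos: break': once the layer is empty every later iteration is skipped,
  -- which a per-iteration guard expresses exactly (an empty layer can never grow again)
  let combos := banned_id.foldl (fun combos b =>
    if combos = [] then combos
    else
      let cand := user_id.filter (fun u => checkB u b)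
      PySem.Set.ofList (combos.flatMap (fun c =>
        ((cand.filter (fun u => !c.contains u)).map
          (fun u => PySem.List.sorted (c ++ [u]) (fun x => x) false)))))
    (PySem.Set.ofList [([] : List String)])
  (combos.length : Int)

-- ===== PRECONDITION & SPEC =====
def Spec_solution (user_id : List String) (banned_id : List String) (out : Int) : Prop := out = solution_alt user_id banned_id
instance (user_id : List String) (banned_id : List String) (out : Int) : Decidable (Spec_solution user_id banned_id out) := by unfold Spec_solution; infer_instance

-- ===== CLAIM (what is proved, stated in full; the proofs are below) =====
def Claim_equal_solution : Prop := ∀ (user_id : List String) (banned_id : List String), Dom_solution user_id banned_id → Spec_solution user_id banned_id (solution user_id banned_id)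

-- ===== LEMMAS AND PROOFS =====

def paths (uids : List String) : List String → List String → List (List String)
  | [], stack => [stack]
  | b :: rest, stack =>
      (uids.filter (fun u => !stack.contains u && checkId u b)).flatMap
        (fun u => paths uids rest (stack ++ [u]))

lemma checkLoop_eq (us bs : List Char) :
    checkLoop us bs = (us.zip bs).all (fun p => p.2 == '*' || p.1 == p.2) := by
  induction us generalizing bs with
  | nil => cases bs <;> simp [checkLoop]
  | cons u us ih =>
    cases bs with
    | nil => simp [checkLoop]
    | cons b bs =>
      by_cases hb : b = '*' <;> by_cases hu : u = b <;>
        simp [checkLoop, hb, hu, ih]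

lemma check_eq (u b : String) : checkId u b = checkB u b := by
  unfold checkId checkB
  rw [checkLoop_eq]
  by_cases h : u.toList.length = b.toList.length
  · simp [h]
  · rw [if_pos h]
    have h' : ¬ u.length = b.length := by simpa using h
    simp [h']

lemma matchA_eq (uids : List String) (bans stack : List String) (acc : PySem.Set (List String)) :
    matchA uids bans stack acc
      = (paths uids bans stack).foldl (fun s c => PySem.Set.add s (PySem.List.sorted c (fun x => x) false)) acc := by
  induction bans generalizing stack acc with
  | nil => simp [matchA, paths]
  | cons b rest ih =>
    have aux : ∀ (l : List String) (acc : PySem.Set (List String)),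
        matchALoop uids b rest stack acc l
          = ((l.filter (fun u => !stack.contains u && checkId u b)).flatMap
              (fun u => paths uids rest (stack ++ [u]))).foldl
              (fun s c => PySem.Set.add s (PySem.List.sorted c (fun x => x) false)) acc := by
      intro l
      induction l with
      | nil => intro acc; simp [matchALoop]
      | cons u us ihl =>
        intro acc
        by_cases hmem : u ∈ stack
        · simp [matchALoop, hmem, ihl]
        · by_cases hc : checkId u b
          · simp [matchALoop, hmem, hc, ihl, ih, List.foldl_append]
          · simp [matchALoop, hmem, hc, ihl]
    rw [matchA, aux, paths]

-- the un-deduplicated, value-list version of B's layered build (shared ground truth of both ports)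
def listStep (uids : List String) (combos : List (List String)) (b : String) : List (List String) :=
  combos.flatMap (fun c =>
    (((uids.filter (fun u => checkB u b)).filter (fun u => !c.contains u)).map (fun u => c ++ [u])))

lemma combos_eq (uids : List String) (bans : List String) (combos : List (List String)) :
    bans.foldl (listStep uids) combos = combos.flatMap (fun c => paths uids bans c) := by
  induction bans generalizing combos with
  | nil => simp [paths]
  | cons b rest ih =>
    have hf : ∀ c : List String,
        ((uids.filter (fun u => checkB u b)).filter (fun u => !c.contains u))
          = uids.filter (fun u => !c.contains u && checkId u b) := by
      intro c
      rw [List.filter_filter]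
      exact List.filter_congr (fun u _ => by rw [check_eq, Bool.and_comm])
    rw [List.foldl_cons, ih, listStep, List.flatMap_assoc]
    congr 1
    funext c
    rw [List.flatMap_map, hf c, paths]

def sortId (c : List String) : List String := PySem.List.sorted c (fun x => x) false

-- B's dedup-every-layer step (the function solution_alt folds)
def bStep (uids : List String) (combos : PySem.Set (List String)) (b : String) : PySem.Set (List String) :=
  PySem.Set.ofList (combos.flatMap (fun c =>
    (((uids.filter (fun u => checkB u b)).filter (fun u => !c.contains u)).map
      (fun u => PySem.List.sorted (c ++ [u]) (fun x => x) false))))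

lemma sortId_sortId_append (c : List String) (u : String) :
    sortId (sortId c ++ [u]) = sortId (c ++ [u]) := by
  unfold sortId
  exact PySem.List.sorted_eq_sorted_of_perm _ _ _ (fun a b h => h)
    ((PySem.List.sorted_perm c (fun x => x) false).append_right [u])

lemma guard_eq (uids : List String) (S : PySem.Set (List String)) (b : String) :
    (if S = [] then S else bStep uids S b) = bStep uids S b := by
  split
  · subst ‹S = []›; rfl
  · rfl

lemma bfold_nodup (uids : List String) (bans : List String) (S : PySem.Set (List String))
    (hS : S.Nodup) : (bans.foldl (bStep uids) S).Nodup := by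
  induction bans generalizing S with
  | nil => exact hS
  | cons b rest ih => exact ih _ (PySem.Set.nodup_ofList _)

lemma bfold_mem (uids : List String) (bans : List String) (L : List (List String))
    (S : PySem.Set (List String)) (hS : ∀ x, x ∈ S ↔ ∃ c ∈ L, x = sortId c) :
    ∀ x, x ∈ bans.foldl (bStep uids) S ↔ ∃ c ∈ bans.foldl (listStep uids) L, x = sortId c := by
  induction bans generalizing L S with
  | nil => exact hS
  | cons b rest ih =>
    refine ih _ _ (fun x => ?_)
    rw [bStep, listStep]
    simp only [PySem.Set.mem_ofList, List.mem_flatMap, List.mem_map]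
    constructor
    · rintro ⟨c, hc, u, hu, rfl⟩
      obtain ⟨c0, hc0, rfl⟩ := (hS c).1 hc
      refine ⟨c0 ++ [u], ⟨c0, hc0, u, ?_, rfl⟩, by simpa [sortId] using sortId_sortId_append c0 u⟩
      simpa [sortId, PySem.List.mem_sorted] using hu
    · rintro ⟨c', ⟨c0, hc0, u, hu, rfl⟩, rfl⟩
      refine ⟨sortId c0, (hS _).2 ⟨c0, hc0, rfl⟩, u, ?_, by simpa [sortId] using sortId_sortId_append c0 u⟩
      simpa [sortId, PySem.List.mem_sorted] using hu

-- ===== VERDICT (by name: the statement is the Claim_ definition above) =====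
theorem solution_spec : Claim_equal_solution := by
  intro user_id banned_id _
  unfold Spec_solution solution solution_alt
  rw [matchA_eq]
  rw [← PySem.Set.update_map_eq_foldl_add, PySem.Set.update_empty]
  have hA_nodup := PySem.Set.nodup_ofList ((paths user_id banned_id []).map (fun c => PySem.List.sorted c (fun x => x) false))
  have hB_nodup := bfold_nodup user_id banned_id (PySem.Set.ofList [([] : List String)]) (PySem.Set.nodup_ofList _)
  have hmem := bfold_mem user_id banned_id [([] : List String)] (PySem.Set.ofList [([] : List String)])
    (by intro x; simp [sortId, PySem.Set.mem_ofList, PySem.List.sorted])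
  have hperm : (banned_id.foldl (bStep user_id) (PySem.Set.ofList [([] : List String)])).Perm
      (PySem.Set.ofList ((paths user_id banned_id []).map (fun c => PySem.List.sorted c (fun x => x) false))) := by
    rw [List.perm_ext_iff_of_nodup hB_nodup hA_nodup]
    intro x
    rw [hmem x, combos_eq]
    simp [sortId, PySem.Set.mem_ofList, eq_comm]
  show ((PySem.Set.ofList ((paths user_id banned_id []).map (fun c => PySem.List.sorted c (fun x => x) false))).length : Int)
      = ((banned_id.foldl (fun S b => if S = [] then S else bStep user_id S b) (PySem.Set.ofList [([] : List String)])).length : Int)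
  have hfun : (fun (S : PySem.Set (List String)) (b : String) => if S = [] then S else bStep user_id S b)
      = bStep user_id := funext fun S => funext fun b => guard_eq user_id S b
  rw [hfun, hperm.length_eq]
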